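-- pv_equiv track=rewrite | github.com/VishwajeetEkal/CSCI-B505-Applied-Algorithms | Assignment 4/QUE03.py | smallest_missing_Number
-- ===== SOURCE A (Python) =====
-- def smallest_missing_Number(streetNumbers, lower, upper):
--         if lower > upper:
--             return lower
--
--         m = int((lower + upper)/2)
--
--         if streetNumbers[m] > m:
--
--             return smallest_missing_Number(streetNumbers, lower, m - 1)
--
--         else:
--
--             return smallest_missing_Number(streetNumbers, m + 1, upper)
-- ===== SOURCE B (Python) =====
-- def smallest_missing_Number(streetNumbers, lower, upper):
--     # iterative binary search: same bound updates as the recursion, kept in mutable variables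
--     while lower <= upper:
--         m = int((lower + upper)/2)
--         if streetNumbers[m] > m:
--             upper = m - 1
--         else:
--             lower = m + 1
--     return lower
-- ===== Notes on version B (the rewrite author's own statement) =====
-- stated objective: idiomatic
-- what changed: The tail recursion is replaced by an iterative while-loop keeping lower/upper as mutable variables and returning lower after the loop (no recursion, no per-call return plumbing).
-- outside the precondition, e.g. on smallest_missing_Number([3, 1], -1, 2): A returns -1, B returns -1
import Mathlib
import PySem

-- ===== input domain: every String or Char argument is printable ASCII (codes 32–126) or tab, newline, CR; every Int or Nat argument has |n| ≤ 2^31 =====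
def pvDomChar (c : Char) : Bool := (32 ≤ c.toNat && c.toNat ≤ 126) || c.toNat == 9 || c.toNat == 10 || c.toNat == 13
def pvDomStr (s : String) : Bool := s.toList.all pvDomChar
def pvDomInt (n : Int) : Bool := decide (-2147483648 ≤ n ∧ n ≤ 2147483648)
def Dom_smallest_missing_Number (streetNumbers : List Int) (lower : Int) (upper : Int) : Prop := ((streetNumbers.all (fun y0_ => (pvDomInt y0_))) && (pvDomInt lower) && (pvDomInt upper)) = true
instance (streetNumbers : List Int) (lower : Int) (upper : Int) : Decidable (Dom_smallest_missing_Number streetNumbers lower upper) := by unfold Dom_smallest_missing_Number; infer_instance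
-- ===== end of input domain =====

-- ===== PORT A =====
-- B replaces A's tail recursion by an iterative while-loop over the same lower/upper bounds (idiomatic rewrite, same cost).
-- Python's int((lower+upper)/2) truncates toward zero: ported as Int.tdiv (exact here, the bounds stay far below 2^53).
-- streetNumbers[m] -> PySem.List.pyGet?; the none (IndexError) case is excluded by Pre_ and both ports return 0 there.
lemma pvMidBounds (l u : Int) (h : l ≤ u) : l ≤ (l + u).tdiv 2 ∧ (l + u).tdiv 2 ≤ u := by
  have h1 := Int.mul_tdiv_add_tmod (l + u) 2
  have h2 := Int.tmod_two_eq (l + u)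
  omega

def smallest_missing_Number (streetNumbers : List Int) (lower : Int) (upper : Int) : Int :=
  if h : lower > upper then lower
  else
    let m := (lower + upper).tdiv 2
    match PySem.List.pyGet? streetNumbers m with
    | none => 0  -- IndexError in Python; outside Pre_
    | some v =>
      if v > m then smallest_missing_Number streetNumbers lower (m - 1)
      else smallest_missing_Number streetNumbers (m + 1) upper
termination_by (upper - lower + 1).toNat
decreasing_by
  · have := pvMidBounds lower upper (by omega); omega
  · have := pvMidBounds lower upper (by omega); omega

-- ===== PORT B =====
-- the while-loop of Source B, with an explicit fuel counter for totality (fuel never runs out: one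
-- iteration shrinks upper - lower by at least one); on fuel exhaustion it returns lower like the post-loop return.
def pvLoop (streetNumbers : List Int) : Nat → Int → Int → Int
  | 0, lower, _ => lower
  | fuel + 1, lower, upper =>
    if lower ≤ upper then
      let m := (lower + upper).tdiv 2
      match PySem.List.pyGet? streetNumbers m with
      | none => 0  -- IndexError in Python; outside Pre_
      | some v =>
        if v > m then pvLoop streetNumbers fuel lower (m - 1)
        else pvLoop streetNumbers fuel (m + 1) upper
    else lower

def smallest_missing_Number_alt (streetNumbers : List Int) (lower : Int) (upper : Int) : Int :=
  pvLoop streetNumbers ((upper - lower + 1).toNat + 1) lower upper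

-- ===== PRECONDITION & SPEC =====
-- Pre_ excludes inputs with an out-of-range bound (lower < -len or upper >= len while lower <= upper):
-- there the Python recursion normally raises IndexError, though it can accidentally return when every
-- probed midpoint happens to stay in range (see claim cites; B behaves identically there anyway).
def Pre_smallest_missing_Number (streetNumbers : List Int) (lower : Int) (upper : Int) : Prop :=
  lower > upper ∨ (-(streetNumbers.length : Int) ≤ lower ∧ upper < streetNumbers.length)
instance (streetNumbers : List Int) (lower : Int) (upper : Int) : Decidable (Pre_smallest_missing_Number streetNumbers lower upper) := by unfold Pre_smallest_missing_Number; infer_instance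
def pvWitness_smallest_missing_Number : List Int × Int × Int := ([0, 2, 3], 0, 2)
-- Spec

def Spec_smallest_missing_Number (streetNumbers : List Int) (lower : Int) (upper : Int) (out : Int) : Prop := out = smallest_missing_Number_alt streetNumbers lower upper
instance (streetNumbers : List Int) (lower : Int) (upper : Int) (out : Int) : Decidable (Spec_smallest_missing_Number streetNumbers lower upper out) := by unfold Spec_smallest_missing_Number; infer_instance


-- ===== CLAIM (what is proved, stated in full; the proofs are below) =====
def Claim_equal_smallest_missing_Number : Prop := ∀ (streetNumbers : List Int) (lower : Int) (upper : Int), Dom_smallest_missing_Number streetNumbers lower upper → Pre_smallest_missing_Number streetNumbers lower upper → Spec_smallest_missing_Number streetNumbers lower upper (smallest_missing_Number streetNumbers lower upper)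

-- ===== LEMMAS AND PROOFS =====
-- the loop with enough fuel computes exactly what the recursion computes
lemma pvLoop_eq (streetNumbers : List Int) (fuel : Nat) (lower upper : Int)
    (hf : (upper - lower + 1).toNat < fuel) :
    pvLoop streetNumbers fuel lower upper = smallest_missing_Number streetNumbers lower upper := by
  induction fuel generalizing lower upper with
  | zero => omega
  | succ fuel ih =>
    rw [pvLoop, smallest_missing_Number]
    by_cases h : lower ≤ upper
    · have hm := pvMidBounds lower upper h
      simp only [h, if_true, show ¬ lower > upper by omega, dite_false]
      cases PySem.List.pyGet? streetNumbers ((lower + upper).tdiv 2) with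
      | none => rfl
      | some v =>
        by_cases hv : v > (lower + upper).tdiv 2 <;> simp only [hv, if_true, if_false]
        · exact ih lower ((lower + upper).tdiv 2 - 1) (by omega)
        · exact ih ((lower + upper).tdiv 2 + 1) upper (by omega)
    · simp only [h, if_false, show lower > upper by omega, dite_true]

-- ===== VERDICT (by name: the statement is the Claim_ definition above) =====
theorem smallest_missing_Number_spec : Claim_equal_smallest_missing_Number := by
  intro streetNumbers lower upper _ _
  unfold Spec_smallest_missing_Number smallest_missing_Number_alt
  exact (pvLoop_eq streetNumbers _ lower upper (by omega)).symm
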